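-- pv_equiv track=rewrite | github.com/gaboza12/we-are-algorithm | 724thomas/Week13 Simulation/20055.py | solution
-- ===== SOURCE A (Python) =====
-- from collections import deque
--
-- def solution(N, K, durability):
--     belt = deque(durability)
--     robots = deque([False] * N)  # 로봇이 있는 위치를 저장하는 리스트
--     step = 0
--
--     while True:
--         step += 1
--
--         belt.rotate(1)
--         robots.rotate(1)
--         robots[-1] = False
--
--         for i in range(N - 2, -1, -1):
--             if robots[i] and not robots[i + 1] and belt[i + 1]:
--                 robots[i] = False
--                 robots[i + 1] = True
--                 belt[i + 1] -= 1
--                 if belt[i+1] == 0: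
--                     K -= 1
--
--         robots[-1] = False
--
--         if belt[0] > 0:
--             robots[0] = True
--             belt[0] -= 1
--             if belt[0] == 0:
--                 K -= 1
--
--         if K <= 0:
--             return step
-- ===== SOURCE B (Python) =====
-- def solution(N, K, durability):
--     # Sparse simulation: robots kept as an ascending list of occupied cell
--     # positions (no boolean array, no full-belt scan), the belt kept as a fixed
--     # array read through a time-modular index.
--     M = len(durability)
--     belt = list(durability)   # physical cells; logical cell j at step t is belt[(j - t) % M]
--     robots = []               # ascending logical positions of the robots (cells 0..N-1)
--     t = 0
--     while True:
--         t += 1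
--         # belt and riders advance one cell; a rider reaching cell N-1 steps off
--         robots = [q for q in ((p + 1) % N for p in robots) if q != N - 1]
--         # each robot tries to advance one more cell, foremost robot first; the
--         # only possible blocker ahead is the robot just processed ('ahead')
--         moved = []
--         ahead = N              # position of nearest robot in front, N = none
--         for p in reversed(robots):
--             j = (p + 1 - t) % M
--             if ahead != p + 1 and belt[j]:
--                 belt[j] -= 1
--                 if belt[j] == 0:
--                     K -= 1
--                 p += 1
--             moved.append(p)
--             ahead = p
--         robots = moved[::-1]
--         if robots and robots[-1] == N - 1:
--             robots.pop()
--         j0 = -t % M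
--         if belt[j0] > 0:
--             belt[j0] -= 1
--             if belt[j0] == 0:
--                 K -= 1
--             robots.insert(0, 0)
--         if K <= 0:
--             return t
-- ===== Notes on version B (the rewrite author's own statement) =====
-- stated objective: alternative
-- what changed: A's boolean robot deque and its full scan of all N-1 cells each step are replaced by a sparse ascending list of robot positions processed foremost-first with a single 'ahead' blocker variable, and the physically rotated belt deque by a fixed array read through a time-modular index; per step B does O(R) robot work for R robots instead of O(N) cell work.
-- outside the precondition, e.g. on solution(3, 1, [1, 0]): A returns 2, B returns 2
import Mathlib
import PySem

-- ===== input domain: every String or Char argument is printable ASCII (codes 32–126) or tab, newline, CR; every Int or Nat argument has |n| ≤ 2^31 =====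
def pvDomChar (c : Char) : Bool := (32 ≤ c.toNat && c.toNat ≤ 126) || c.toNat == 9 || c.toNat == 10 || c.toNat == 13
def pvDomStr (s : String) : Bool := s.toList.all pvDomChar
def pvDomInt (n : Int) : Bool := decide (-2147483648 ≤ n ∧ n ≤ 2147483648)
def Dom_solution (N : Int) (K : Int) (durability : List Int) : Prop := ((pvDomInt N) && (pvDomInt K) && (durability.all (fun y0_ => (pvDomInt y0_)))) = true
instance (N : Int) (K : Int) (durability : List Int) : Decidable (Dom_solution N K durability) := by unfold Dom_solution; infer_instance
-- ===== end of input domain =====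

set_option maxHeartbeats 1600000

-- B replaces A's boolean robot deque and full per-cell scan by a sparse ascending list of
-- robot positions processed foremost-first, and the rotated belt deque by a fixed array
-- read through a time-modular index; objective: alternative (same simulation, different
-- data structure and traversal).

-- ===== PORT A =====
-- deque.rotate(1): the last element moves to the front (no-op on an empty deque)
def pvRotR {α : Type} (xs : List α) : List α :=
  match xs.getLast? with
  | none => []
  | some v => v :: xs.dropLast

-- body of 'for i in range(N - 2, -1, -1)'; state is (robots, belt, K)
def pvInnerA (st : List Bool × List Int × Int) (i : Int) : List Bool × List Int × Int :=
  let robots := st.1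
  let belt := st.2.1
  let K := st.2.2
  if PySem.List.pyGetD robots i false = true ∧ PySem.List.pyGetD robots (i + 1) false = false ∧
      PySem.List.pyGetD belt (i + 1) 0 ≠ 0 then
    let robots := PySem.List.pySetD robots i false
    let robots := PySem.List.pySetD robots (i + 1) true
    let v := PySem.List.pyGetD belt (i + 1) 0 - 1
    let belt := PySem.List.pySetD belt (i + 1) v
    let K := if v = 0 then K - 1 else K
    (robots, belt, K)
  else st

-- one iteration of 'while True' (everything after 'step += 1'); returns (belt, robots, K)
def pvStepA (N : Int) (belt : List Int) (robots : List Bool) (K : Int) :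
    List Int × List Bool × Int :=
  let belt := pvRotR belt
  let robots := pvRotR robots
  let robots := PySem.List.pySetD robots (-1) false
  let st := (PySem.List.pyRange (N - 2) (-1) (-1)).foldl pvInnerA (robots, belt, K)
  let robots := st.1
  let belt := st.2.1
  let K := st.2.2
  let robots := PySem.List.pySetD robots (-1) false
  let b0 := PySem.List.pyGetD belt 0 0
  if 0 < b0 then
    (PySem.List.pySetD belt 0 (b0 - 1), PySem.List.pySetD robots 0 true,
      if b0 - 1 = 0 then K - 1 else K)
  else (belt, robots, K)

-- 'while True' as fuel recursion; the fuel is never exhausted on inputs satisfying Pre_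
def pvLoopA (N : Int) : Nat → List Int → List Bool → Int → Int → Int
  | 0, _, _, _, step => step
  | fuel + 1, belt, robots, K, step =>
    let step := step + 1
    let st := pvStepA N belt robots K
    if st.2.2 ≤ 0 then step else pvLoopA N fuel st.1 st.2.1 st.2.2 step

def pvFuel (durability : List Int) : Nat := (durability.length + 1) * 2147483650 + 2

def solution (N : Int) (K : Int) (durability : List Int) : Int :=
  pvLoopA N (pvFuel durability) durability (List.replicate N.toNat false) K 0

-- ===== PORT B =====
-- 'for p in reversed(robots): …' — advance each robot, foremost first; 'ahead' is the
-- position of the robot just processed (N = none); returns (moved list, belt, K)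
def pvAdv (N M t : Int) : List Int → List Int → Int → Int → List Int × List Int × Int
  | [], belt, K, _ => ([], belt, K)
  | p :: rest, belt, K, ahead =>
    let j := PySem.Int.mod (p + 1 - t) M
    if ahead ≠ p + 1 ∧ PySem.List.pyGetD belt j 0 ≠ 0 then
      let v := PySem.List.pyGetD belt j 0 - 1
      let belt' := PySem.List.pySetD belt j v
      let K' := if v = 0 then K - 1 else K
      let res := pvAdv N M t rest belt' K' (p + 1)
      ((p + 1) :: res.1, res.2.1, res.2.2)
    else
      let res := pvAdv N M t rest belt K p
      (p :: res.1, res.2.1, res.2.2)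

-- one iteration of B's 'while True' (everything after 't += 1'); returns (belt, robots, K)
def pvStepP (N M t : Int) (belt : List Int) (robots : List Int) (K : Int) :
    List Int × List Int × Int :=
  let robots1 := (robots.map (fun p => PySem.Int.mod (p + 1) N)).filter
    (fun q => decide (q ≠ N - 1))
  let res := pvAdv N M t robots1.reverse belt K N
  let robots2 := res.1.reverse
  let belt2 := res.2.1
  let K2 := res.2.2
  let robots3 := if robots2 ≠ [] ∧ PySem.List.pyGetD robots2 (-1) 0 = N - 1
    then robots2.dropLast else robots2
  let j0 := PySem.Int.mod (-t) M
  let b0 := PySem.List.pyGetD belt2 j0 0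
  if 0 < b0 then
    (PySem.List.pySetD belt2 j0 (b0 - 1), 0 :: robots3, if b0 - 1 = 0 then K2 - 1 else K2)
  else (belt2, robots3, K2)

def pvLoopP (N M : Int) : Nat → List Int → List Int → Int → Int → Int
  | 0, _, _, _, t => t
  | fuel + 1, belt, robots, K, t =>
    let t := t + 1
    let st := pvStepP N M t belt robots K
    if st.2.2 ≤ 0 then t else pvLoopP N M fuel st.1 st.2.1 st.2.2 t

def solution_alt (N : Int) (K : Int) (durability : List Int) : Int :=
  let M := PySem.List.len durability
  pvLoopP N M (pvFuel durability) durability [] K 0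

-- ===== PRECONDITION & SPEC =====
-- Pre_ excludes inputs where A raises IndexError (N = 0, an empty belt, or — unless K ≤ 0 —
-- a robot index beyond the belt: we require N ≤ len(durability) when K > 0) and inputs where
-- A loops forever (K positive and larger than the number of positive-durability cells, the
-- only cells that can ever reach 0 and decrement K). It also excludes some early-terminating
-- inputs with K > 0 and N > len(durability) on which A happens to return before indexing out
-- of range (see cites).
def Pre_solution (N : Int) (K : Int) (durability : List Int) : Prop :=
  1 ≤ N ∧ 1 ≤ (durability.length : Int) ∧
    (K ≤ 0 ∨ (N ≤ (durability.length : Int) ∧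
      K ≤ ((durability.countP (fun d => decide (0 < d)) : Nat) : Int)))
instance (N : Int) (K : Int) (durability : List Int) : Decidable (Pre_solution N K durability) := by
  unfold Pre_solution; infer_instance

def pvWitness_solution : Int × Int × List Int := (2, 2, [1, 0, 2, 1])

def Spec_solution (N : Int) (K : Int) (durability : List Int) (out : Int) : Prop := out = solution_alt N K durability
instance (N : Int) (K : Int) (durability : List Int) (out : Int) : Decidable (Spec_solution N K durability out) := by unfold Spec_solution; infer_instance

-- ===== CLAIM (what is proved, stated in full; the proofs are below) =====
def Claim_equal_solution : Prop := ∀ (N : Int) (K : Int) (durability : List Int), Dom_solution N K durability → Pre_solution N K durability → Spec_solution N K durability (solution N K durability)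

-- ===== LEMMAS AND PROOFS =====

-- robots as a boolean list from a list of occupied positions (membership only)
def pvBoolOf (S : List Int) (N : Int) : List Bool :=
  (PySem.List.pyRange 0 N 1).map (fun j => decide (j ∈ S))

-- the loop invariant on B's robot-position list
def pvInvP (N : Int) (ps : List Int) : Prop :=
  List.Pairwise (· < ·) ps ∧ ∀ p ∈ ps, 0 ≤ p ∧ p < N ∧ (p = N - 1 → N = 1)

theorem pvRotR_length {α : Type} (x : List α) : (pvRotR x).length = x.length := by
  unfold pvRotR
  cases hx : x.getLast? with
  | none => simp [List.getLast?_eq_none_iff.mp hx]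
  | some v =>
    have hne : x ≠ [] := by
      intro h; subst h; simp at hx
    have hpos : 0 < x.length := List.length_pos_iff.mpr hne
    simp [List.length_dropLast]
    omega

theorem pvRotR_eq_rotate {α : Type} (x : List α) (hx : x ≠ []) :
    pvRotR x = x.rotate (x.length - 1) := by
  have hpos : 0 < x.length := List.length_pos_iff.mpr hx
  unfold pvRotR
  rw [List.getLast?_eq_some_getLast hx]
  rw [List.rotate_eq_drop_append_take (by omega)]
  rw [List.drop_length_sub_one hx, ← List.dropLast_eq_take]
  rfl

theorem rotate_pvRotR {α : Type} (x : List α) (hx : x ≠ []) (s : Nat) :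
    (pvRotR x).rotate (s + 1) = x.rotate s := by
  have hlen : 0 < x.length := List.length_pos_iff.mpr hx
  rw [pvRotR_eq_rotate x hx, List.rotate_rotate]
  have : x.length - 1 + (s + 1) = x.length + s := by omega
  rw [this, ← List.rotate_rotate, List.rotate_length]

theorem pvBidx_spec (m r : Nat) (hm : 0 < m) (i : Int) (h0 : 0 ≤ i) (h1 : i < (m : Int)) :
    0 ≤ PySem.Int.mod (PySem.Int.mod (-(r : Int)) m + i) m ∧
    PySem.Int.mod (PySem.Int.mod (-(r : Int)) m + i) m < (m : Int) ∧
    ((PySem.Int.mod (PySem.Int.mod (-(r : Int)) m + i) m).toNat + r) % m = i.toNat := by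
  have hmz : (0 : Int) < (m : Int) := by exact_mod_cast hm
  rw [PySem.Int.mod_eq_emod_of_pos hmz, PySem.Int.mod_eq_emod_of_pos hmz]
  have hne : (m : Int) ≠ 0 := by omega
  refine ⟨Int.emod_nonneg _ hne, Int.emod_lt_of_pos _ hmz, ?_⟩
  set p : Int := ((-(r : Int)) % m + i) % m with hp
  have hp0 : 0 ≤ p := Int.emod_nonneg _ hne
  have hp1 : p < (m : Int) := Int.emod_lt_of_pos _ hmz
  have key : (p + r) % (m : Int) = i := by
    calc (p + r) % (m : Int) = ((-(r : Int)) % m + i + r) % m := by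
            rw [hp, Int.emod_add_emod]
      _ = ((-(r : Int)) % m + (i + r)) % m := by ring_nf
      _ = (-(r : Int) + (i + r)) % m := by rw [Int.emod_add_emod]
      _ = i % m := by ring_nf
      _ = i := Int.emod_eq_of_lt h0 h1
  have hcast : (((p.toNat + r) % m : Nat) : Int) = (i.toNat : Int) := by
    rw [Int.natCast_emod]
    push_cast
    rw [Int.toNat_of_nonneg hp0, Int.toNat_of_nonneg h0]
    exact key
  exact_mod_cast hcast

theorem pvKey_iff (m r k p i : Nat) (hk : k < m) (hp : p < m) (hi : i < m)
    (hcong : (p + r) % m = i) : (p = k ↔ i = (k + r) % m) := by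
  constructor
  · rintro rfl; exact hcong.symm
  · intro h
    have h2 : (k + r) % m = (p + r) % m := by rw [hcong, ← h]
    have h3 : k % m = p % m := Nat.ModEq.add_right_cancel' r h2
    rw [Nat.mod_eq_of_lt hk, Nat.mod_eq_of_lt hp] at h3
    omega

theorem pvRead_sim {α : Type} (x : List α) (m r : Nat) (hlen : x.length = m)
    (i : Int) (d : α) (h0 : 0 ≤ i) (h1 : i < (m : Int)) :
    PySem.List.pyGetD (x.rotate r) (PySem.Int.mod (PySem.Int.mod (-(r : Int)) m + i) m) d
      = PySem.List.pyGetD x i d := by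
  have hm : 0 < m := by omega
  obtain ⟨hp0, hp1, hcong⟩ := pvBidx_spec m r hm i h0 h1
  rw [PySem.List.pyGetD_eq_getElem _ d hp0 (by simpa [List.length_rotate, hlen] using hp1),
      PySem.List.pyGetD_eq_getElem _ d h0 (by omega)]
  rw [List.getElem_rotate]
  have hidx : (((PySem.Int.mod (PySem.Int.mod (-(r : Int)) m + i) m).toNat + r) % x.length)
      = i.toNat := by
    rw [hlen]; exact hcong
  simp [hidx]

theorem pvWrite_sim {α : Type} (x : List α) (m r : Nat) (hlen : x.length = m)
    (i : Int) (v : α) (h0 : 0 ≤ i) (h1 : i < (m : Int)) :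
    PySem.List.pySetD (x.rotate r) (PySem.Int.mod (PySem.Int.mod (-(r : Int)) m + i) m) v
      = (PySem.List.pySetD x i v).rotate r := by
  have hm : 0 < m := by omega
  obtain ⟨hp0, hp1, hcong⟩ := pvBidx_spec m r hm i h0 h1
  rw [PySem.List.pySetD_of_nonneg _ _ hp0, PySem.List.pySetD_of_nonneg _ _ h0]
  apply List.ext_getElem
  · simp [hlen]
  · intro k hk1 hk2
    have hkm : k < m := by simpa [List.length_set, List.length_rotate, hlen] using hk1
    have hplt : (PySem.Int.mod (PySem.Int.mod (-(r : Int)) m + i) m).toNat < m := by omega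
    have hilt : i.toNat < m := by omega
    simp only [List.getElem_set, List.getElem_rotate, List.length_set, hlen]
    have hiff := pvKey_iff m r k _ i.toNat hkm hplt hilt hcong
    by_cases hc : (PySem.Int.mod (PySem.Int.mod (-(r : Int)) m + i) m).toNat = k
    · rw [if_pos hc, if_pos (hiff.mp hc)]
    · rw [if_neg hc, if_neg (fun h => hc (hiff.mpr h))]

theorem pvSetD_neg_one {α : Type} (x : List α) (hx : x ≠ []) (v : α) :
    PySem.List.pySetD x (-1) v = PySem.List.pySetD x ((x.length : Int) - 1) v := by
  have hlen : 0 < x.length := List.length_pos_iff.mpr hx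
  simp only [PySem.List.pySetD, PySem.List.pySet?, PySem.List.pyIdx?]
  have h1 : ¬ ((0:Int) ≤ -1) := by omega
  have h2 : -((x.length : Int)) ≤ -1 := by omega
  have h3 : (0:Int) ≤ (x.length : Int) - 1 := by omega
  have h4 : (x.length : Int) - 1 < (x.length : Int) := by omega
  rw [if_neg h1, if_pos h2, if_pos h3, if_pos h4]
  congr 2
  simp only [neg_neg, Int.toNat_one]
  congr 1
  omega

theorem pvMod_zero_add (m : Nat) (hm : 0 < m) (a : Int) :
    PySem.Int.mod a (m : Int) = PySem.Int.mod (PySem.Int.mod a (m : Int) + 0) (m : Int) := by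
  have hmz : (0 : Int) < (m : Int) := by exact_mod_cast hm
  rw [PySem.Int.mod_eq_emod_of_pos hmz, PySem.Int.mod_eq_emod_of_pos hmz, add_zero,
    Int.emod_emod_of_dvd _ dvd_rfl]

theorem pvMod_shift (m : Nat) (hm : 0 < m) (a b : Int) :
    PySem.Int.mod (b + a) (m : Int) = PySem.Int.mod (PySem.Int.mod a (m : Int) + b) (m : Int) := by
  have hmz : (0 : Int) < (m : Int) := by exact_mod_cast hm
  rw [PySem.Int.mod_eq_emod_of_pos hmz, PySem.Int.mod_eq_emod_of_pos hmz,
    PySem.Int.mod_eq_emod_of_pos hmz, Int.emod_add_emod, add_comm]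

-- basic pvBoolOf lemmas
theorem pvBoolOf_length (S : List Int) (N : Int) : (pvBoolOf S N).length = N.toNat := by
  simp [pvBoolOf, PySem.List.length_pyRange_one]

theorem pvBoolOf_getElem (S : List Int) (N : Int) (k : Nat) (hk : k < (pvBoolOf S N).length) :
    (pvBoolOf S N)[k] = decide ((k : Int) ∈ S) := by
  have hk' : k < N.toNat := by simpa [pvBoolOf_length] using hk
  unfold pvBoolOf
  rw [List.getElem_map, PySem.List.getElem_pyRange_one, zero_add]

theorem pvBoolOf_nil (N : Int) : pvBoolOf [] N = List.replicate N.toNat false := by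
  simp [pvBoolOf, List.map_const', PySem.List.length_pyRange_one]

theorem pvGetD_pvBoolOf (S : List Int) (N i : Int) (h0 : 0 ≤ i) (h1 : i < N) :
    PySem.List.pyGetD (pvBoolOf S N) i false = decide (i ∈ S) := by
  rw [PySem.List.pyGetD_eq_getElem _ _ h0 (by simp [pvBoolOf, PySem.List.length_pyRange_one]; omega)]
  rw [pvBoolOf_getElem]
  rw [Int.toNat_of_nonneg h0]

theorem pvBoolOf_congr (S S' : List Int) (N : Int)
    (h : ∀ j : Int, 0 ≤ j → j < N → (j ∈ S ↔ j ∈ S')) : pvBoolOf S N = pvBoolOf S' N := by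
  apply List.ext_getElem
  · simp [pvBoolOf_length]
  · intro k hk1 hk2
    rw [pvBoolOf_getElem, pvBoolOf_getElem]
    have hkN : (k : Int) < N := by have := hk1; simp [pvBoolOf_length] at this; omega
    simp only [decide_eq_decide]
    exact h k (Int.natCast_nonneg k) hkN

theorem pvSetD_pvBoolOf_true (S : List Int) (N i : Int) (h0 : 0 ≤ i) (h1 : i < N) :
    PySem.List.pySetD (pvBoolOf S N) i true = pvBoolOf (i :: S) N := by
  rw [PySem.List.pySetD_of_nonneg _ _ h0]
  apply List.ext_getElem
  · simp [pvBoolOf_length]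
  · intro k hk1 hk2
    have hkN : (k : Int) < N := by simp [pvBoolOf_length] at hk2; omega
    rw [List.getElem_set, pvBoolOf_getElem]
    by_cases hc : i.toNat = k
    · rw [if_pos hc, pvBoolOf_getElem]
      have : (k : Int) = i := by omega
      simp [this]
    · rw [if_neg hc, pvBoolOf_getElem]
      have : (k : Int) ≠ i := by omega
      simp [List.mem_cons, this]

theorem pvSetD_pvBoolOf_false (S : List Int) (N i : Int) (h0 : 0 ≤ i) (h1 : i < N) :
    PySem.List.pySetD (pvBoolOf S N) i false
      = pvBoolOf (S.filter (fun q => decide (q ≠ i))) N := by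
  rw [PySem.List.pySetD_of_nonneg _ _ h0]
  apply List.ext_getElem
  · simp [pvBoolOf_length]
  · intro k hk1 hk2
    have hkN : (k : Int) < N := by simp [pvBoolOf_length] at hk2; omega
    rw [List.getElem_set, pvBoolOf_getElem]
    by_cases hc : i.toNat = k
    · rw [if_pos hc, pvBoolOf_getElem]
      have : (k : Int) = i := by omega
      simp [List.mem_filter, this]
    · rw [if_neg hc, pvBoolOf_getElem]
      have : (k : Int) ≠ i := by omega
      simp [List.mem_filter, this]

theorem pvRotR_pvBoolOf (S : List Int) (N : Int) (hN : 1 ≤ N)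
    (hS : ∀ p ∈ S, 0 ≤ p ∧ p < N) :
    pvRotR (pvBoolOf S N) = pvBoolOf (S.map (fun p => PySem.Int.mod (p + 1) N)) N := by
  have hNz : (0 : Int) < N := by omega
  have hn1 : 1 ≤ N.toNat := by omega
  have hx : pvBoolOf S N ≠ [] := by
    intro h
    have hl := pvBoolOf_length S N
    rw [h] at hl
    simp at hl
    omega
  rw [pvRotR_eq_rotate _ hx]
  apply List.ext_getElem
  · simp [pvBoolOf_length]
  · intro k hk1 hk2
    have hkN : k < N.toNat := by simpa [List.length_rotate, pvBoolOf_length] using hk1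
    rw [List.getElem_rotate, pvBoolOf_getElem, pvBoolOf_getElem]
    rw [decide_eq_decide, List.mem_map]
    have hmodk : ((k + ((pvBoolOf S N).length - 1)) % (pvBoolOf S N).length)
        = (if k = 0 then N.toNat - 1 else k - 1) := by
      rw [pvBoolOf_length]
      by_cases hk0 : k = 0
      · subst hk0
        simp [Nat.mod_eq_of_lt (by omega : N.toNat - 1 < N.toNat)]
      · have h1 : k + (N.toNat - 1) = (k - 1) + N.toNat := by omega
        rw [if_neg hk0, h1, Nat.add_mod_right, Nat.mod_eq_of_lt (by omega)]
    rw [hmodk]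
    constructor
    · intro hmem
      by_cases hk0 : k = 0
      · rw [if_pos hk0] at hmem
        refine ⟨((N.toNat - 1 : Nat) : Int), hmem, ?_⟩
        have he : ((N.toNat - 1 : Nat) : Int) + 1 = N := by omega
        rw [he, PySem.Int.mod_eq_emod_of_pos hNz, Int.emod_self]
        omega
      · rw [if_neg hk0] at hmem
        refine ⟨((k - 1 : Nat) : Int), hmem, ?_⟩
        have he : ((k - 1 : Nat) : Int) + 1 = (k : Int) := by omega
        rw [he, PySem.Int.mod_eq_emod_of_pos hNz,
          Int.emod_eq_of_lt (by omega) (by omega)]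
    · rintro ⟨p, hp, hfp⟩
      obtain ⟨hp0, hpN⟩ := hS p hp
      rw [PySem.Int.mod_eq_emod_of_pos hNz] at hfp
      by_cases hpe : p + 1 = N
      · rw [hpe, Int.emod_self] at hfp
        rw [if_pos (by omega : k = 0)]
        have he : ((N.toNat - 1 : Nat) : Int) = p := by omega
        rw [he]
        exact hp
      · rw [Int.emod_eq_of_lt (by omega) (by omega)] at hfp
        rw [if_neg (by omega : ¬ k = 0)]
        have he : ((k - 1 : Nat) : Int) = p := by omega
        rw [he]
        exact hp

theorem pvInnerA_skip (st : List Bool × List Int × Int) (i : Int)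
    (h : PySem.List.pyGetD st.1 i false = false) : pvInnerA st i = st := by
  unfold pvInnerA
  rw [if_neg]
  simp [h]

theorem pvG (N : Int) (m r : Nat) (hN : 1 ≤ N) (hNM : N ≤ (m : Int)) :
    ∀ (n : Nat) (qs fin : List Int) (ahead : Int) (beltA : List Int) (K : Int),
      beltA.length = m →
      List.Pairwise (fun a b => b < a) qs →
      (∀ q ∈ qs, 0 ≤ q ∧ q ≤ (n : Int) - 1) →
      (n : Int) - 1 ≤ N - 2 →
      (∀ f ∈ fin, ahead ≤ f) →
      (fin = [] → ahead = N) →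
      (fin ≠ [] → ahead ∈ fin) →
      (n : Int) ≤ ahead → ahead ≤ N →
      ∃ beltA' : List Int,
        (PySem.List.pyRange ((n : Int) - 1) (-1) (-1)).foldl pvInnerA
            (pvBoolOf (qs ++ fin) N, beltA, K)
          = (pvBoolOf ((pvAdv N (m : Int) (r : Int) qs (beltA.rotate r) K ahead).1 ++ fin) N,
             beltA', (pvAdv N (m : Int) (r : Int) qs (beltA.rotate r) K ahead).2.2)
        ∧ (pvAdv N (m : Int) (r : Int) qs (beltA.rotate r) K ahead).2.1 = beltA'.rotate r
        ∧ beltA'.length = m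
        ∧ List.Pairwise (fun a b => b < a) (pvAdv N (m : Int) (r : Int) qs (beltA.rotate r) K ahead).1
        ∧ (∀ x ∈ (pvAdv N (m : Int) (r : Int) qs (beltA.rotate r) K ahead).1,
            (∃ q ∈ qs, x = q ∨ x = q + 1) ∧ x < ahead) := by
  intro n
  induction n with
  | zero =>
    intro qs fin ahead beltA K hb hpair hq hu hf hfe hfne hna haN
    have hqs : qs = [] := by
      cases qs with
      | nil => rfl
      | cons q qs' =>
        have := hq q (List.mem_cons_self ..)
        push_cast at this
        omega
    subst hqs
    have hA : pvAdv N (m : Int) (r : Int) [] (beltA.rotate r) K ahead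
        = ([], beltA.rotate r, K) := rfl
    refine ⟨beltA, ?_, by rw [hA], hb, by rw [hA]; exact List.Pairwise.nil,
      by rw [hA]; simp⟩
    have h0 : ((0 : Nat) : Int) - 1 = (-1 : Int) := by norm_num
    rw [h0, PySem.List.pyRange_neg_one_eq_nil (by norm_num), hA]
    rfl
  | succ n ih =>
    intro qs fin ahead beltA K hb hpair hq hu hf hfe hfne hna haN
    replace hna : (n : Int) + 1 ≤ ahead := by push_cast at hna; omega
    replace hu : (n : Int) ≤ N - 2 := by push_cast at hu; omega
    replace hq : ∀ q ∈ qs, 0 ≤ q ∧ q ≤ (n : Int) := by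
      intro q hq'
      have := hq q hq'
      push_cast at this
      omega
    have hn0 : (0 : Int) ≤ (n : Int) := Int.natCast_nonneg n
    have hNn : ((n + 1 : Nat) : Int) - 1 = (n : Int) := by push_cast; ring
    rw [hNn, PySem.List.pyRange_neg_one_cons (by omega : (-1 : Int) < (n : Int)),
      List.foldl_cons]
    have haheadmem : ∀ x : Int, x < N → x ≤ ahead → (x ∈ fin ↔ ahead = x) := by
      intro x hxN hxa
      constructor
      · intro hx
        have := hf x hx
        omega
      · intro hx
        by_cases hemp : fin = []
        · exact absurd (hfe hemp) (by omega)
        · rw [← hx] at *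
          exact hfne hemp
    cases qs with
    | nil =>
      have hskip : PySem.List.pyGetD (pvBoolOf ([] ++ fin) N) (n : Int) false = false := by
        rw [pvGetD_pvBoolOf _ _ _ hn0 (by omega)]
        simp only [List.nil_append, decide_eq_false_iff_not]
        intro hmem
        have := hf _ hmem
        omega
      rw [pvInnerA_skip _ _ hskip]
      exact ih [] fin ahead beltA K hb List.Pairwise.nil (by simp) (by omega) hf hfe hfne
        (by omega) haN
    | cons q rest =>
      have hq0 := hq q (List.mem_cons_self ..)
      have hrest_lt : ∀ x ∈ rest, x < q := (List.pairwise_cons.mp hpair).1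
      have hpair_rest : List.Pairwise (fun a b => b < a) rest := (List.pairwise_cons.mp hpair).2
      by_cases hqn : q = (n : Int)
      · -- robot at cell q = n is examined now
        rw [← hqn]
        have hmem_n : PySem.List.pyGetD (pvBoolOf ((q :: rest) ++ fin) N) q false = true := by
          rw [pvGetD_pvBoolOf _ _ _ hq0.1 (by omega)]
          simp
        have hmem_n1 : PySem.List.pyGetD (pvBoolOf ((q :: rest) ++ fin) N) (q + 1) false
            = decide (ahead = q + 1) := by
          rw [pvGetD_pvBoolOf _ _ _ (by omega) (by omega)]
          rw [decide_eq_decide]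
          have h1 : ¬ (q + 1 ∈ rest) := fun h => absurd (hrest_lt _ h) (by omega)
          have h2 : q + 1 ≠ q := by omega
          have h3 : (q + 1 ∈ fin) ↔ ahead = q + 1 := haheadmem (q + 1) (by omega) (by omega)
          simp only [List.mem_append, List.mem_cons]
          tauto
        have hmpos : 0 < m := by omega
        have hbelt : PySem.List.pyGetD (beltA.rotate r)
            (PySem.Int.mod (q + 1 - (r : Int)) (m : Int)) 0
            = PySem.List.pyGetD beltA (q + 1) 0 := by
          have e1 : q + 1 - (r : Int) = (q + 1) + (-(r : Int)) := by ring
          rw [e1, pvMod_shift m hmpos, pvRead_sim beltA m r hb _ 0 (by omega) (by omega)]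
        set c := PySem.List.pyGetD beltA (q + 1) 0 with hc
        by_cases hcond : ahead ≠ q + 1 ∧ c ≠ 0
        · -- the robot moves to q+1
          have hA1 : pvInnerA (pvBoolOf ((q :: rest) ++ fin) N, beltA, K) q
              = (pvBoolOf (rest ++ ((q + 1) :: fin)) N,
                 PySem.List.pySetD beltA (q + 1) (c - 1),
                 if c - 1 = 0 then K - 1 else K) := by
            unfold pvInnerA
            simp only []
            rw [if_pos ⟨hmem_n, by rw [hmem_n1]; simpa using hcond.1, hcond.2⟩]
            rw [pvSetD_pvBoolOf_false _ _ _ hq0.1 (by omega)]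
            rw [pvSetD_pvBoolOf_true _ _ _ (by omega) (by omega)]
            refine congrArg (fun z => (z, PySem.List.pySetD beltA (q + 1) (c - 1),
              if c - 1 = 0 then K - 1 else K)) ?_
            apply pvBoolOf_congr
            intro j _ _
            have hjq1 : j ∈ rest → j ≠ q := fun h => by have := hrest_lt _ h; omega
            have hjq2 : j ∈ fin → j ≠ q := fun h => by have := hf _ h; omega
            simp only [List.mem_cons, List.mem_filter, List.mem_append, decide_eq_true_eq]
            tauto
          have hB1 : pvAdv N (m : Int) (r : Int) (q :: rest) (beltA.rotate r) K ahead
              = ((q + 1) :: (pvAdv N (m : Int) (r : Int) rest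
                    ((PySem.List.pySetD beltA (q + 1) (c - 1)).rotate r)
                    (if c - 1 = 0 then K - 1 else K) (q + 1)).1,
                 (pvAdv N (m : Int) (r : Int) rest
                    ((PySem.List.pySetD beltA (q + 1) (c - 1)).rotate r)
                    (if c - 1 = 0 then K - 1 else K) (q + 1)).2.1,
                 (pvAdv N (m : Int) (r : Int) rest
                    ((PySem.List.pySetD beltA (q + 1) (c - 1)).rotate r)
                    (if c - 1 = 0 then K - 1 else K) (q + 1)).2.2) := by
            have ew : PySem.List.pySetD (beltA.rotate r)
                (PySem.Int.mod (q + 1 - (r : Int)) (m : Int)) (c - 1)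
                = (PySem.List.pySetD beltA (q + 1) (c - 1)).rotate r := by
              have e1 : q + 1 - (r : Int) = (q + 1) + (-(r : Int)) := by ring
              rw [e1, pvMod_shift m hmpos, pvWrite_sim beltA m r hb _ _ (by omega) (by omega)]
            simp only [pvAdv, hbelt]
            rw [if_pos hcond, ew]
          rw [hA1, hB1]
          obtain ⟨beltA'', Hfold, Hrot, Hlen, Hpair', Hmem'⟩ :=
            ih rest ((q + 1) :: fin) (q + 1) (PySem.List.pySetD beltA (q + 1) (c - 1))
              (if c - 1 = 0 then K - 1 else K)
              (by rw [PySem.List.length_pySetD, hb])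
              hpair_rest
              (by intro x hx
                  have h1 := hq x (List.mem_cons_of_mem _ hx)
                  have h2 := hrest_lt x hx
                  omega)
              (by omega)
              (by intro f hf'
                  rcases List.mem_cons.mp hf' with h1 | h1
                  · omega
                  · have := hf _ h1
                    omega)
              (by intro h; simp at h)
              (by intro _; exact List.mem_cons_self ..)
              (by omega)
              (by omega)
          rw [← hqn] at Hfold
          refine ⟨beltA'', ?_, Hrot, Hlen, ?_, ?_⟩
          · rw [Hfold]
            refine congrArg (fun z => (z, beltA'',
              (pvAdv N (m : Int) (r : Int) rest
                ((PySem.List.pySetD beltA (q + 1) (c - 1)).rotate r)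
                (if c - 1 = 0 then K - 1 else K) (q + 1)).2.2)) ?_
            apply pvBoolOf_congr
            intro j _ _
            simp only [List.mem_append, List.mem_cons]
            tauto
          · refine List.pairwise_cons.mpr ⟨?_, Hpair'⟩
            intro x hx
            exact (Hmem' x hx).2
          · intro x hx
            rcases List.mem_cons.mp hx with h1 | h1
            · exact ⟨⟨q, List.mem_cons_self .., Or.inr h1⟩, by omega⟩
            · obtain ⟨⟨q', hq', hor⟩, hlt⟩ := Hmem' x h1
              exact ⟨⟨q', List.mem_cons_of_mem _ hq', hor⟩, by omega⟩
        · -- the robot stays at q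
          have hA2 : pvInnerA (pvBoolOf ((q :: rest) ++ fin) N, beltA, K) q
              = (pvBoolOf ((q :: rest) ++ fin) N, beltA, K) := by
            unfold pvInnerA
            simp only []
            rw [if_neg]
            rintro ⟨_, h2, h3⟩
            rw [hmem_n1] at h2
            simp at h2
            exact hcond ⟨h2, h3⟩
          have hB2 : pvAdv N (m : Int) (r : Int) (q :: rest) (beltA.rotate r) K ahead
              = (q :: (pvAdv N (m : Int) (r : Int) rest (beltA.rotate r) K q).1,
                 (pvAdv N (m : Int) (r : Int) rest (beltA.rotate r) K q).2.1,
                 (pvAdv N (m : Int) (r : Int) rest (beltA.rotate r) K q).2.2) := by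
            simp only [pvAdv, hbelt]
            rw [if_neg hcond]
          have hcg : pvBoolOf ((q :: rest) ++ fin) N = pvBoolOf (rest ++ (q :: fin)) N := by
            apply pvBoolOf_congr
            intro j _ _
            simp only [List.mem_append, List.mem_cons]
            tauto
          rw [hA2, hcg, hB2]
          obtain ⟨beltA'', Hfold, Hrot, Hlen, Hpair', Hmem'⟩ :=
            ih rest (q :: fin) q beltA K hb hpair_rest
              (by intro x hx
                  have h1 := hq x (List.mem_cons_of_mem _ hx)
                  have h2 := hrest_lt x hx
                  omega)
              (by omega)
              (by intro f hf'
                  rcases List.mem_cons.mp hf' with h1 | h1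
                  · omega
                  · have := hf _ h1
                    omega)
              (by intro h; simp at h)
              (by intro _; exact List.mem_cons_self ..)
              (by omega)
              (by omega)
          rw [← hqn] at Hfold
          refine ⟨beltA'', ?_, Hrot, Hlen, ?_, ?_⟩
          · rw [Hfold]
            refine congrArg (fun z => (z, beltA'',
              (pvAdv N (m : Int) (r : Int) rest (beltA.rotate r) K q).2.2)) ?_
            apply pvBoolOf_congr
            intro j _ _
            simp only [List.mem_append, List.mem_cons]
            tauto
          · refine List.pairwise_cons.mpr ⟨?_, Hpair'⟩
            intro x hx
            exact (Hmem' x hx).2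
          · intro x hx
            rcases List.mem_cons.mp hx with h1 | h1
            · exact ⟨⟨q, List.mem_cons_self .., Or.inl h1⟩, by omega⟩
            · obtain ⟨⟨q', hq', hor⟩, hlt⟩ := Hmem' x h1
              exact ⟨⟨q', List.mem_cons_of_mem _ hq', hor⟩, by omega⟩
      · -- no robot at cell n: skip
        have hskip : PySem.List.pyGetD (pvBoolOf ((q :: rest) ++ fin) N) (n : Int) false
            = false := by
          rw [pvGetD_pvBoolOf _ _ _ hn0 (by omega)]
          simp only [decide_eq_false_iff_not]
          intro hmem
          rcases List.mem_append.mp hmem with h | h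
          · rcases List.mem_cons.mp h with h1 | h1
            · exact hqn h1.symm
            · have := hrest_lt _ h1
              omega
          · have := hf _ h
            omega
        rw [pvInnerA_skip _ _ hskip]
        exact ih (q :: rest) fin ahead beltA K hb hpair
          (by intro x hx
              rcases List.mem_cons.mp hx with h1 | h1
              · subst h1; omega
              · have h2 := hrest_lt _ h1
                have h3 := hq x hx
                omega)
          (by omega) hf hfe hfne (by omega) haN

-- ===== the per-step simulation =====
theorem pvGetD_neg_one_concat (l : List Int) (x d : Int) :
    PySem.List.pyGetD (l ++ [x]) (-1) d = x := by
  simp only [PySem.List.pyGetD, PySem.List.pyGet?, PySem.List.pyIdx?]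
  rw [if_neg (by omega : ¬ (0 : Int) ≤ -1),
    if_pos (by
      have : 1 ≤ (l ++ [x]).length := by simp
      omega : -(((l ++ [x]).length : Int)) ≤ -1)]
  simp [List.getElem?_concat_length]

theorem pvStep_simP (N : Int) (m : Nat) (hN : 1 ≤ N) (hNM : N ≤ (m : Int)) (s : Nat)
    (ba : List Int) (ps : List Int) (K : Int) (hba : ba.length = m) (hinv : pvInvP N ps) :
    (pvStepP N (m : Int) ((s : Int) + 1) (ba.rotate s) ps K).1
        = (pvStepA N ba (pvBoolOf ps N) K).1.rotate (s + 1)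
    ∧ (pvStepA N ba (pvBoolOf ps N) K).2.1
        = pvBoolOf (pvStepP N (m : Int) ((s : Int) + 1) (ba.rotate s) ps K).2.1 N
    ∧ (pvStepP N (m : Int) ((s : Int) + 1) (ba.rotate s) ps K).2.2
        = (pvStepA N ba (pvBoolOf ps N) K).2.2
    ∧ pvInvP N (pvStepP N (m : Int) ((s : Int) + 1) (ba.rotate s) ps K).2.1 := by
  obtain ⟨hsort, hbnd⟩ := hinv
  have hmpos : 0 < m := by omega
  have hNtn : ((N.toNat : Nat) : Int) = N := by omega
  have hbane : ba ≠ [] := by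
    intro h; rw [h] at hba; simp at hba; omega
  have hpvne : ∀ S : List Int, pvBoolOf S N ≠ [] := by
    intro S h
    have := pvBoolOf_length S N
    rw [h] at this; simp at this; omega
  -- the rotated-and-trimmed robot list
  set S1 : List Int := ps.map (fun p => PySem.Int.mod (p + 1) N) with hS1def
  set ps1 : List Int := S1.filter (fun q => decide (q ≠ N - 1)) with hps1def
  have hps1_pair : List.Pairwise (· < ·) ps1 := by
    by_cases hN1 : N = 1
    · have : ps1 = [] := by
        rw [hps1def, List.filter_eq_nil_iff]
        intro a ha
        rw [hS1def] at ha
        obtain ⟨p, hp, rfl⟩ := List.mem_map.mp ha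
        simp only [decide_eq_true_eq, Decidable.not_not]
        rw [hN1, PySem.Int.mod_eq_emod_of_pos (by norm_num), Int.emod_one]
        omega
      rw [this]; exact List.Pairwise.nil
    · have hmapeq : S1 = ps.map (fun p => p + 1) := by
        rw [hS1def]
        apply List.map_congr_left
        intro p hp
        have h1 := hbnd p hp
        have h2 : p + 1 < N := by
          rcases h1 with ⟨h3, h4, h5⟩
          by_cases he : p = N - 1
          · exact absurd (h5 he) hN1
          · omega
        rw [PySem.Int.mod_eq_emod_of_pos (by omega), Int.emod_eq_of_lt (by omega) h2]
      rw [hps1def, hmapeq]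
      apply List.Pairwise.filter
      rw [List.pairwise_map]
      exact hsort.imp (by omega)
  have hps1_bnd : ∀ x ∈ ps1, 1 ≤ x ∧ x ≤ N - 2 := by
    intro x hx
    rw [hps1def] at hx
    obtain ⟨hx1, hx2⟩ := List.mem_filter.mp hx
    rw [hS1def] at hx1
    obtain ⟨p, hp, rfl⟩ := List.mem_map.mp hx1
    obtain ⟨h3, h4, _⟩ := hbnd p hp
    simp only [decide_eq_true_eq] at hx2
    rw [PySem.Int.mod_eq_emod_of_pos (by omega)] at hx2 ⊢
    by_cases he : p + 1 = N
    · rw [he, Int.emod_self] at hx2 ⊢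
      omega
    · rw [Int.emod_eq_of_lt (by omega) (by omega)] at hx2 ⊢
      omega
  -- the A-side initial robot row equals pvBoolOf ps1
  have hrow1 : PySem.List.pySetD (pvRotR (pvBoolOf ps N)) (-1) false = pvBoolOf ps1 N := by
    rw [pvRotR_pvBoolOf ps N hN (fun p hp => ⟨(hbnd p hp).1, (hbnd p hp).2.1⟩)]
    rw [pvSetD_neg_one _ (hpvne _) false, pvBoolOf_length, hNtn]
    rw [pvSetD_pvBoolOf_false _ _ _ (by omega) (by omega)]
  -- the inner loop, via pvG
  obtain ⟨beltA', Hfold, Hrot, Hlen, Hpair', Hmem'⟩ :=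
    pvG N m (s + 1) hN hNM (N - 1).toNat ps1.reverse [] N (pvRotR ba) K
      (by rw [pvRotR_length, hba])
      (List.pairwise_reverse.mpr (hps1_pair.imp (by omega)))
      (by intro q hq
          have := hps1_bnd q (List.mem_reverse.mp hq)
          omega)
      (by omega) (by simp) (by intro _; rfl) (by intro h; simp at h) (by omega) le_rfl
  have hrotEq : (pvRotR ba).rotate (s + 1) = ba.rotate s := rotate_pvRotR ba hbane s
  have htEq : (((s + 1 : Nat)) : Int) = (s : Int) + 1 := by push_cast; ring
  rw [hrotEq, htEq] at Hfold Hrot Hpair' Hmem'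
  rw [show (((N - 1).toNat : Nat) : Int) - 1 = N - 2 by omega] at Hfold
  rw [show pvBoolOf (ps1.reverse ++ []) N = pvBoolOf ps1 N from
    pvBoolOf_congr _ _ _ (by intro j _ _; simp)] at Hfold
  set adv := pvAdv N (m : Int) ((s : Int) + 1) ps1.reverse (ba.rotate s) K N with hadvdef
  rw [show pvBoolOf (adv.1 ++ []) N = pvBoolOf adv.1 N from
    pvBoolOf_congr _ _ _ (by intro j _ _; simp)] at Hfold
  have hadv_bnd : ∀ x ∈ adv.1, 1 ≤ x ∧ x ≤ N - 1 := by
    intro x hx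
    obtain ⟨⟨q', hq', hor⟩, _⟩ := Hmem' x hx
    have := hps1_bnd q' (List.mem_reverse.mp hq')
    rcases hor with h | h <;> omega
  -- the second robots[-1] = False versus B's conditional pop
  set robots3 : List Int := if adv.1.reverse ≠ [] ∧
      PySem.List.pyGetD adv.1.reverse (-1) 0 = N - 1
    then adv.1.reverse.dropLast else adv.1.reverse with hr3def
  have hrow2 : pvBoolOf (adv.1.filter (fun q => decide (q ≠ N - 1))) N
      = pvBoolOf robots3 N := by
    apply pvBoolOf_congr
    intro j _ _
    rw [hr3def]
    cases hadv1 : adv.1 with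
    | nil => simp
    | cons x xs =>
      have hxlt : ∀ y ∈ xs, y < x := (List.pairwise_cons.mp (hadv1 ▸ Hpair')).1
      have hrev : (x :: xs).reverse = xs.reverse ++ [x] := by simp
      rw [hrev, pvGetD_neg_one_concat]
      by_cases hxl : x = N - 1
      · rw [if_pos ⟨by simp, hxl⟩, List.dropLast_concat]
        simp only [List.mem_filter, List.mem_cons, List.mem_reverse, decide_eq_true_eq]
        constructor
        · rintro ⟨h1 | h1, h2⟩
          · omega
          · exact h1
        · intro h
          exact ⟨Or.inr h, by have := hxlt j h; omega⟩
      · rw [if_neg (by rintro ⟨_, h⟩; exact hxl h)]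
        simp only [List.mem_filter, List.mem_cons, List.mem_append, List.mem_reverse,
          decide_eq_true_eq]
        constructor
        · rintro ⟨h1 | h1, h2⟩
          · exact Or.inr (Or.inl h1)
          · exact Or.inl h1
        · rintro (h | h | h)
          · exact ⟨Or.inr h, by
              have h1 := hxlt j h
              have h2 := hadv_bnd x (by rw [hadv1]; exact List.mem_cons_self ..)
              omega⟩
          · exact ⟨Or.inl h, by omega⟩
          · simp at h
  have hr3_pair : List.Pairwise (· < ·) robots3 := by
    rw [hr3def]
    cases hadv1 : adv.1 with
    | nil => simp
    | cons x xs =>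
      have hd := hadv1 ▸ Hpair'
      split_ifs
      · rw [show (x :: xs).reverse = xs.reverse ++ [x] by simp, List.dropLast_concat]
        exact List.pairwise_reverse.mpr ((List.pairwise_cons.mp hd).2.imp (by omega))
      · exact List.pairwise_reverse.mpr (hd.imp (by omega))
  have hr3_bnd : ∀ x ∈ robots3, 1 ≤ x ∧ x ≤ N - 2 := by
    rw [hr3def]
    cases hadv1 : adv.1 with
    | nil => simp
    | cons x xs =>
      have hxlt : ∀ y ∈ xs, y < x := (List.pairwise_cons.mp (hadv1 ▸ Hpair')).1
      have hb1 : ∀ y ∈ x :: xs, 1 ≤ y ∧ y ≤ N - 1 := by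
        intro y hy; exact hadv_bnd y (hadv1 ▸ hy)
      have hrev : (x :: xs).reverse = xs.reverse ++ [x] := by simp
      rw [hrev, pvGetD_neg_one_concat]
      by_cases hxl : x = N - 1
      · rw [if_pos ⟨by simp, hxl⟩, List.dropLast_concat]
        intro y hy
        have hym := List.mem_reverse.mp hy
        have := hb1 y (List.mem_cons_of_mem _ hym)
        have := hxlt y hym
        omega
      · rw [if_neg (by rintro ⟨_, h⟩; exact hxl h)]
        intro y hy
        rcases List.mem_append.mp hy with h | h
        · have h1 := List.mem_reverse.mp h
          have h2 := hb1 y (List.mem_cons_of_mem _ h1)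
          have h3 := hxlt y h1
          have h4 := hb1 x (List.mem_cons_self ..)
          omega
        · have : y = x := by simpa using h
          subst this
          have := hb1 y (List.mem_cons_self ..)
          omega
  -- the entry-cell read on B's side
  have hread0 : PySem.List.pyGetD adv.2.1 (PySem.Int.mod (-((s : Int) + 1)) (m : Int)) 0
      = PySem.List.pyGetD beltA' 0 0 := by
    rw [Hrot, show (-((s : Int) + 1)) = (-(((s + 1 : Nat)) : Int)) by push_cast; ring,
      pvMod_zero_add m hmpos, pvRead_sim beltA' m (s + 1) Hlen 0 0 le_rfl (by exact_mod_cast hmpos)]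
  have hwrite0 : PySem.List.pySetD adv.2.1 (PySem.Int.mod (-((s : Int) + 1)) (m : Int))
      (PySem.List.pyGetD beltA' 0 0 - 1)
      = (PySem.List.pySetD beltA' 0 (PySem.List.pyGetD beltA' 0 0 - 1)).rotate (s + 1) := by
    rw [Hrot, show (-((s : Int) + 1)) = (-(((s + 1 : Nat)) : Int)) by push_cast; ring,
      pvMod_zero_add m hmpos, pvWrite_sim beltA' m (s + 1) Hlen 0 _ le_rfl (by exact_mod_cast hmpos)]
  -- explicit forms of both steps
  have hA : pvStepA N ba (pvBoolOf ps N) K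
      = (if 0 < PySem.List.pyGetD beltA' 0 0 then
           (PySem.List.pySetD beltA' 0 (PySem.List.pyGetD beltA' 0 0 - 1),
            pvBoolOf (0 :: robots3) N,
            if PySem.List.pyGetD beltA' 0 0 - 1 = 0 then adv.2.2 - 1 else adv.2.2)
         else (beltA', pvBoolOf robots3 N, adv.2.2)) := by
    unfold pvStepA
    simp only []
    rw [hrow1, Hfold]
    simp only []
    rw [pvSetD_neg_one _ (hpvne _) false, pvBoolOf_length, hNtn,
      pvSetD_pvBoolOf_false _ _ _ (by omega) (by omega), hrow2]
    by_cases hb0 : 0 < PySem.List.pyGetD beltA' 0 0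
    · rw [if_pos hb0, if_pos hb0]
      rw [pvSetD_pvBoolOf_true _ _ _ le_rfl (by omega)]
    · rw [if_neg hb0, if_neg hb0]
  have hB : pvStepP N (m : Int) ((s : Int) + 1) (ba.rotate s) ps K
      = (if 0 < PySem.List.pyGetD beltA' 0 0 then
           ((PySem.List.pySetD beltA' 0 (PySem.List.pyGetD beltA' 0 0 - 1)).rotate (s + 1),
            0 :: robots3,
            if PySem.List.pyGetD beltA' 0 0 - 1 = 0 then adv.2.2 - 1 else adv.2.2)
         else (beltA'.rotate (s + 1), robots3, adv.2.2)) := by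
    unfold pvStepP
    simp only []
    rw [← hps1def, ← hadvdef, ← hr3def, hread0]
    by_cases hb0 : 0 < PySem.List.pyGetD beltA' 0 0
    · rw [if_pos hb0, if_pos hb0, hwrite0]
    · rw [if_neg hb0, if_neg hb0, Hrot]
  have hinv3 : pvInvP N robots3 := by
    refine ⟨hr3_pair, ?_⟩
    intro p hp
    have := hr3_bnd p hp
    exact ⟨by omega, by omega, by omega⟩
  rw [hA, hB]
  by_cases hb0 : 0 < PySem.List.pyGetD beltA' 0 0
  · rw [if_pos hb0, if_pos hb0]
    refine ⟨rfl, rfl, rfl, ?_⟩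
    refine ⟨List.pairwise_cons.mpr ⟨fun x hx => by have := hr3_bnd x hx; omega,
      hr3_pair⟩, ?_⟩
    intro p hp
    rcases List.mem_cons.mp hp with h | h
    · subst h
      exact ⟨le_rfl, by omega, by omega⟩
    · have := hr3_bnd p h
      exact ⟨by omega, by omega, by omega⟩
  · rw [if_neg hb0, if_neg hb0]
    exact ⟨rfl, rfl, rfl, hinv3⟩

theorem pvInnerA_len (st : List Bool × List Int × Int) (i : Int) :
    (pvInnerA st i).1.length = st.1.length ∧ (pvInnerA st i).2.1.length = st.2.1.length := by
  simp only [pvInnerA]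
  split_ifs <;> simp [PySem.List.length_pySetD]

theorem pvInnerA_foldl_len (is : List Int) :
    ∀ st : List Bool × List Int × Int,
      (is.foldl pvInnerA st).1.length = st.1.length ∧
      (is.foldl pvInnerA st).2.1.length = st.2.1.length := by
  induction is with
  | nil => intro st; simp
  | cons i is ih =>
    intro st
    simp only [List.foldl_cons]
    obtain ⟨h1, h2⟩ := ih (pvInnerA st i)
    obtain ⟨h3, h4⟩ := pvInnerA_len st i
    exact ⟨h1.trans h3, h2.trans h4⟩

theorem pvStepA_len (N : Int) (ba : List Int) (ra : List Bool) (K : Int) :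
    (pvStepA N ba ra K).1.length = ba.length ∧ (pvStepA N ba ra K).2.1.length = ra.length := by
  unfold pvStepA
  simp only []
  obtain ⟨h1, h2⟩ := pvInnerA_foldl_len (PySem.List.pyRange (N - 2) (-1) (-1))
    (PySem.List.pySetD (pvRotR ra) (-1) false, pvRotR ba, K)
  split_ifs <;>
    simp [PySem.List.length_pySetD, h1, h2, pvRotR_length]

-- ===== the loop simulation =====
theorem pvLoopP_sim (N : Int) (m : Nat) (hN : 1 ≤ N) (hNM : N ≤ (m : Int)) :
    ∀ (fuel s : Nat) (ba : List Int) (ps : List Int) (K : Int),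
      ba.length = m → pvInvP N ps →
      pvLoopP N (m : Int) fuel (ba.rotate s) ps K (s : Int)
        = pvLoopA N fuel ba (pvBoolOf ps N) K (s : Int) := by
  intro fuel
  induction fuel with
  | zero => intro s ba ps K hba hinv; rfl
  | succ fuel ih =>
    intro s ba ps K hba hinv
    show (let t := (s : Int) + 1;
          let st := pvStepP N (m : Int) t (ba.rotate s) ps K;
          if st.2.2 ≤ 0 then t else pvLoopP N (m : Int) fuel st.1 st.2.1 st.2.2 t)
        = (let step := (s : Int) + 1;
          let st := pvStepA N ba (pvBoolOf ps N) K;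
          if st.2.2 ≤ 0 then step else pvLoopA N fuel st.1 st.2.1 st.2.2 step)
    simp only []
    obtain ⟨h1, h2, h3, hinv'⟩ := pvStep_simP N m hN hNM s ba ps K hba hinv
    rw [h3]
    set stA := pvStepA N ba (pvBoolOf ps N) K with hstA
    by_cases hk : stA.2.2 ≤ 0
    · rw [if_pos hk, if_pos hk]
    · rw [if_neg hk, if_neg hk]
      obtain ⟨hl1, hl2⟩ := pvStepA_len N ba (pvBoolOf ps N) K
      have hcast : ((s : Int) + 1) = (((s + 1 : Nat)) : Int) := by push_cast; ring
      rw [h1, h2]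
      rw [hcast] at hinv' ⊢
      exact ih (s + 1) stA.1 _ stA.2.2 (by rw [← hstA] at hl1; rw [hl1, hba]) hinv'

-- ===== degenerate branch (K ≤ 0 and N > len): both return after one step =====
theorem pvAllFalse_pyGetD (xs : List Bool) (h : ∀ b ∈ xs, b = false) (i : Int) :
    PySem.List.pyGetD xs i false = false := by
  unfold PySem.List.pyGetD
  cases hg : PySem.List.pyGet? xs i with
  | none => rfl
  | some b => exact h b (PySem.List.mem_of_pyGet?_eq_some _ hg)

theorem pvAllFalse_pySetD (xs : List Bool) (h : ∀ b ∈ xs, b = false) (i : Int) :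
    ∀ b ∈ PySem.List.pySetD xs i false, b = false := by
  intro b hb
  unfold PySem.List.pySetD PySem.List.pySet? at hb
  cases hk : PySem.List.pyIdx? xs.length i with
  | none => rw [hk] at hb; simp at hb; exact h b hb
  | some k =>
    rw [hk] at hb; simp at hb
    rcases List.mem_or_eq_of_mem_set hb with h1 | h1
    · exact h b h1
    · exact h1

theorem pvAllFalse_pvRotR (xs : List Bool) (h : ∀ b ∈ xs, b = false) :
    ∀ b ∈ pvRotR xs, b = false := by
  intro b hb
  unfold pvRotR at hb
  cases hg : xs.getLast? with
  | none => rw [hg] at hb; simp at hb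
  | some v =>
    rw [hg] at hb
    rcases List.mem_cons.mp hb with h1 | h1
    · subst h1; exact h b (List.mem_of_getLast? hg)
    · exact h b (List.dropLast_subset xs h1)

theorem pvInnerA_fold_id (is : List Int) (ra : List Bool) (ba : List Int) (K : Int)
    (h : ∀ b ∈ ra, b = false) :
    is.foldl pvInnerA (ra, ba, K) = (ra, ba, K) := by
  induction is with
  | nil => rfl
  | cons i is ih =>
    simp only [List.foldl_cons]
    rw [show pvInnerA (ra, ba, K) i = (ra, ba, K) by
      unfold pvInnerA
      rw [if_neg]
      simp [pvAllFalse_pyGetD ra h]]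
    exact ih

theorem pvStepA_K_le (N : Int) (ba : List Int) (ra : List Bool) (K : Int)
    (h : ∀ b ∈ ra, b = false) : (pvStepA N ba ra K).2.2 ≤ K := by
  unfold pvStepA
  simp only []
  rw [pvInnerA_fold_id _ _ _ _ (pvAllFalse_pySetD _ (pvAllFalse_pvRotR ra h) _)]
  split_ifs <;> simp <;> omega

theorem pvStepP_K_le (N M t : Int) (ba : List Int) (K : Int) :
    (pvStepP N M t ba [] K).2.2 ≤ K := by
  unfold pvStepP pvAdv
  simp only [List.map_nil, List.filter_nil, List.reverse_nil]
  split_ifs <;> simp <;> omega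

theorem pvFuel_succ (durability : List Int) :
    pvFuel durability = ((durability.length + 1) * 2147483650 + 1) + 1 := rfl

theorem pvLoopA_succ (N : Int) (fuel : Nat) (belt : List Int) (robots : List Bool)
    (K step : Int) :
    pvLoopA N (fuel + 1) belt robots K step =
      (if (pvStepA N belt robots K).2.2 ≤ 0 then step + 1
       else pvLoopA N fuel (pvStepA N belt robots K).1 (pvStepA N belt robots K).2.1
         (pvStepA N belt robots K).2.2 (step + 1)) := rfl

theorem pvLoopP_succ (N M : Int) (fuel : Nat) (belt : List Int) (robots : List Int)
    (K t : Int) :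
    pvLoopP N M (fuel + 1) belt robots K t =
      (if (pvStepP N M (t + 1) belt robots K).2.2 ≤ 0 then t + 1
       else pvLoopP N M fuel (pvStepP N M (t + 1) belt robots K).1
         (pvStepP N M (t + 1) belt robots K).2.1
         (pvStepP N M (t + 1) belt robots K).2.2 (t + 1)) := rfl

-- ===== VERDICT (by name: the statement is the Claim_ definition above) =====
theorem solution_spec : Claim_equal_solution := by
  intro N K durability _hdom hpre
  obtain ⟨hN, hM, hdisj⟩ := hpre
  unfold Spec_solution solution solution_alt
  simp only [PySem.List.len_eq]
  by_cases hNM : N ≤ (durability.length : Int)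
  · have := pvLoopP_sim N durability.length hN hNM (pvFuel durability) 0 durability [] K
      rfl ⟨List.Pairwise.nil, by simp⟩
    rw [pvBoolOf_nil] at this
    simpa using this.symm
  · have hK : K ≤ 0 := by
      rcases hdisj with h | h
      · exact h
      · exact absurd h.1 hNM
    have hAF : ∀ b ∈ List.replicate N.toNat false, b = false := by
      intro b hb; exact (List.eq_of_mem_replicate hb)
    rw [pvFuel_succ, pvLoopA_succ, pvLoopP_succ]
    rw [if_pos (le_trans (pvStepA_K_le N durability _ K hAF) hK),
        if_pos (le_trans (pvStepP_K_le N (durability.length : Int) _ durability K) hK)]
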